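-- pv_equiv track=rewrite | github.com/pypi-data/pypi-mirror-401 | packages/bygul/bygul-1.0.7-py3-none-any.whl/bygul/utils.py | evaluate_matches
-- ===== SOURCE A (Python) =====
-- import itertools
--
-- def evaluate_matches(left_primer_coordinates, right_primer_coordinates):
--     """Find valid primer pairs that can produce an amplicon with mismatches."""
--     if left_primer_coordinates and right_primer_coordinates:
--         valid_combinations = []
--         combinations = itertools.product(left_primer_coordinates,
--                                          right_primer_coordinates)
--         for left, right in combinations:
--             left_pos, left_mismatch_map = left
--             right_pos, right_mismatch_map = right
--             amplicon_length = right_pos - left_pos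
--
--             if 0 < amplicon_length <= 2000:
--                 valid_combinations.append(
--                     (left_pos, right_pos,
--                      left_mismatch_map,
--                      right_mismatch_map)
--                 )
--
--         return valid_combinations
--     else:
--         return []
-- ===== SOURCE B (Python) =====
-- def _bisect_right(a, x):
--     """Classic binary-search insertion point: number of elements <= x in sorted a."""
--     lo, hi = 0, len(a)
--     while lo < hi:
--         mid = (lo + hi) // 2
--         if x < a[mid]:
--             hi = mid
--         else:
--             lo = mid + 1
--     return lo
--
--
-- def evaluate_matches(left_primer_coordinates, right_primer_coordinates):
--     """Find valid primer pairs that can produce an amplicon with mismatches.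
--
--     Sort right primers by position once; per left primer, binary-search the
--     window (left_pos, left_pos + 2000], then restore original right order.
--     """
--     indexed = sorted(
--         ((pos, i, mm) for i, (pos, mm) in enumerate(right_primer_coordinates)),
--         key=lambda t: t[0])
--     positions = [t[0] for t in indexed]
--     result = []
--     for left_pos, left_mm in left_primer_coordinates:
--         lo = _bisect_right(positions, left_pos)
--         hi = _bisect_right(positions, left_pos + 2000)
--         window = sorted(indexed[lo:hi], key=lambda t: t[1])
--         for right_pos, _i, right_mm in window:
--             result.append((left_pos, right_pos, left_mm, right_mm))
--     return result
-- ===== Notes on version B (the rewrite author's own statement) =====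
-- stated objective: alternative
-- what changed: Replaces the full cross-product scan with a one-time sort of the right primers by position, a binary-searched window (left_pos, left_pos+2000] per left primer, and a re-sort of the window by original index to restore A's output order; it trades the nested scan for sorting plus binary search, which only pays off when few pairs match.
import Mathlib
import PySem

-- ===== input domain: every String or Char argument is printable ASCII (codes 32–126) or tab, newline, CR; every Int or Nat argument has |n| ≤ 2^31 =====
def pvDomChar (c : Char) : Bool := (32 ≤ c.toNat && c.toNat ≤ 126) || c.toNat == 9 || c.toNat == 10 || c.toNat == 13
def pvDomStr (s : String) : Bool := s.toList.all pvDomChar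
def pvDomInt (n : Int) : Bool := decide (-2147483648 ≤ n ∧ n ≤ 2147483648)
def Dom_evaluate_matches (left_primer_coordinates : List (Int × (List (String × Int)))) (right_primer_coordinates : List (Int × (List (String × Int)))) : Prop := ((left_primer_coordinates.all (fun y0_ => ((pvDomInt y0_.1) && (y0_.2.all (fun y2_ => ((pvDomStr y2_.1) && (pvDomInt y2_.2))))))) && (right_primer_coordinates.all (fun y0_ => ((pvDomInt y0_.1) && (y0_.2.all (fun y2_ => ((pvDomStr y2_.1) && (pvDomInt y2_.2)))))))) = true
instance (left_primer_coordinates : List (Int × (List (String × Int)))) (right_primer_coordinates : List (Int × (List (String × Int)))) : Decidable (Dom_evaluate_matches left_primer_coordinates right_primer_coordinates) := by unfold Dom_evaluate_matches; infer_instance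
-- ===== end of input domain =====

-- B sorts right primers by position once and, per left primer, binary-searches the window (left_pos, left_pos+2000] (re-sorted to original order) instead of scanning the full cross product; an alternative algorithm, not measured faster on dense inputs.
-- ===== PORT A =====
def evaluate_matches (left_primer_coordinates : List (Int × (List (String × Int)))) (right_primer_coordinates : List (Int × (List (String × Int)))) : List (Int × Int × (List (String × Int)) × (List (String × Int))) :=
  if left_primer_coordinates ≠ [] ∧ right_primer_coordinates ≠ [] then
    -- combinations = itertools.product(left, right)
    let combinations := left_primer_coordinates.flatMap (fun l => right_primer_coordinates.map (fun r => (l, r)))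
    combinations.foldl (fun valid_combinations lr =>
      let amplicon_length := lr.2.1 - lr.1.1
      if 0 < amplicon_length ∧ amplicon_length ≤ 2000 then
        valid_combinations ++ [(lr.1.1, lr.2.1, lr.1.2, lr.2.2)]
      else valid_combinations) []
  else []

-- ===== PORT B =====
-- _bisect_right in Source B is the classic bisect_right binary search, ported as the prelude primitive PySem.List.bisectRight.
def evaluate_matches_alt (left_primer_coordinates : List (Int × (List (String × Int)))) (right_primer_coordinates : List (Int × (List (String × Int)))) : List (Int × Int × (List (String × Int)) × (List (String × Int))) :=
  let indexed := PySem.List.sorted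
    ((PySem.List.enumerate right_primer_coordinates).map (fun p => (p.2.1, p.1, p.2.2)))
    (fun t => t.1)
  let positions := indexed.map (fun t => t.1)
  left_primer_coordinates.foldl (fun result l =>
    let lo := PySem.List.bisectRight positions l.1
    let hi := PySem.List.bisectRight positions (l.1 + 2000)
    let window := PySem.List.sorted (PySem.List.slice indexed (some (lo : Int)) (some (hi : Int))) (fun t => t.2.1)
    window.foldl (fun result t => result ++ [(l.1, t.1, l.2, t.2.2)]) result) []

-- ===== PRECONDITION & SPEC =====
def Spec_evaluate_matches (left_primer_coordinates : List (Int × (List (String × Int)))) (right_primer_coordinates : List (Int × (List (String × Int)))) (out : List (Int × Int × (List (String × Int)) × (List (String × Int)))) : Prop := out = evaluate_matches_alt left_primer_coordinates right_primer_coordinates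
instance (left_primer_coordinates : List (Int × (List (String × Int)))) (right_primer_coordinates : List (Int × (List (String × Int)))) (out : List (Int × Int × (List (String × Int)) × (List (String × Int)))) : Decidable (Spec_evaluate_matches left_primer_coordinates right_primer_coordinates out) := by unfold Spec_evaluate_matches; infer_instance

-- ===== CLAIM (what is proved, stated in full; the proofs are below) =====
def Claim_equal_evaluate_matches : Prop := ∀ (left_primer_coordinates : List (Int × (List (String × Int)))) (right_primer_coordinates : List (Int × (List (String × Int)))), Dom_evaluate_matches left_primer_coordinates right_primer_coordinates → Spec_evaluate_matches left_primer_coordinates right_primer_coordinates (evaluate_matches left_primer_coordinates right_primer_coordinates)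

-- ===== LEMMAS AND PROOFS =====

-- the common canonical form: per left primer, the in-order filter of the right primers
def pvC (L R : List (Int × (List (String × Int)))) : List (Int × Int × (List (String × Int)) × (List (String × Int))) :=
  L.flatMap (fun l =>
    (R.filter (fun r => decide (0 < r.1 - l.1 ∧ r.1 - l.1 ≤ 2000))).map
      (fun r => (l.1, r.1, l.2, r.2)))

theorem pv_take_eq_filter {α : Type} (P : α → Bool) (xs : List α) (k : Nat)
    (h1 : ∀ (j : Nat) (hj : j < xs.length), j < k → P xs[j])
    (h2 : ∀ (j : Nat) (hj : j < xs.length), k ≤ j → ¬ P xs[j] = true) :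
    xs.take k = xs.filter P := by
  induction xs generalizing k with
  | nil => simp
  | cons x t ih =>
    cases k with
    | zero =>
      have : ∀ a ∈ x :: t, ¬ P a = true := by
        intro a ha
        obtain ⟨j, hj, rfl⟩ := List.mem_iff_getElem.1 ha
        exact h2 j hj (Nat.zero_le _)
      simp [List.filter_eq_nil_iff.2 this]
    | succ k =>
      have hx : P x = true := h1 0 (by simp) (Nat.succ_pos _)
      simp only [List.take_succ_cons, List.filter_cons, hx, if_pos]
      rw [ih k (fun j hj hjk => h1 (j+1) (by simpa using Nat.succ_lt_succ hj) (Nat.succ_lt_succ hjk))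
            (fun j hj hjk => h2 (j+1) (by simpa using Nat.succ_lt_succ hj) (Nat.succ_le_succ hjk))]


theorem pv_drop_eq_filter {α : Type} (P : α → Bool) (xs : List α) (k : Nat)
    (h1 : ∀ (j : Nat) (hj : j < xs.length), j < k → ¬ P xs[j] = true)
    (h2 : ∀ (j : Nat) (hj : j < xs.length), k ≤ j → P xs[j]) :
    xs.drop k = xs.filter P := by
  induction xs generalizing k with
  | nil => simp
  | cons x t ih =>
    cases k with
    | zero =>
      have : ∀ a ∈ x :: t, P a = true := by
        intro a ha
        obtain ⟨j, hj, rfl⟩ := List.mem_iff_getElem.1 ha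
        exact h2 j hj (Nat.zero_le _)
      simp [List.filter_eq_self.2 this]
    | succ k =>
      have hx : ¬ P x = true := h1 0 (by simp) (Nat.succ_pos _)
      simp only [List.drop_succ_cons, List.filter_cons]
      rw [if_neg hx]
      exact ih k (fun j hj hjk => h1 (j+1) (by simpa using Nat.succ_lt_succ hj) (Nat.succ_lt_succ hjk))
            (fun j hj hjk => h2 (j+1) (by simpa using Nat.succ_lt_succ hj) (Nat.succ_le_succ hjk))

theorem pv_A_eq (L R : List (Int × (List (String × Int)))) :
    evaluate_matches L R = pvC L R := by
  unfold evaluate_matches pvC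
  by_cases hL : L = []
  · simp [hL]
  by_cases hR : R = []
  · simp [hR]
  rw [if_pos ⟨hL, hR⟩]
  simp only []
  rw [PySem.List.foldl_append_ite (p := fun lr : ((Int × (List (String × Int))) × (Int × (List (String × Int)))) => 0 < lr.2.1 - lr.1.1 ∧ lr.2.1 - lr.1.1 ≤ 2000)
      (f := fun lr => (lr.1.1, lr.2.1, lr.1.2, lr.2.2))]
  simp [List.filter_flatMap, List.filter_map, List.map_flatMap, Function.comp_def]

theorem pv_window (R : List (Int × (List (String × Int)))) (a b : Int) (hab : a ≤ b) :
    (PySem.List.sorted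
      (PySem.List.slice
        (PySem.List.sorted ((PySem.List.enumerate R).map (fun p => (p.2.1, p.1, p.2.2))) (fun t => t.1))
        (some ((PySem.List.bisectRight ((PySem.List.sorted ((PySem.List.enumerate R).map (fun p => (p.2.1, p.1, p.2.2))) (fun t => t.1)).map (fun t => t.1)) a : Nat) : Int))
        (some ((PySem.List.bisectRight ((PySem.List.sorted ((PySem.List.enumerate R).map (fun p => (p.2.1, p.1, p.2.2))) (fun t => t.1)).map (fun t => t.1)) b : Nat) : Int)))
      (fun t => t.2.1))
    = ((PySem.List.enumerate R).map (fun p => (p.2.1, p.1, p.2.2))).filter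
        (fun t => decide (a < t.1 ∧ t.1 ≤ b)) := by
  set T := (PySem.List.enumerate R).map (fun p : Int × (Int × List (String × Int)) => (p.2.1, p.1, p.2.2)) with hT
  set X := PySem.List.sorted T (fun t => t.1) with hX
  set pos := X.map (fun t => t.1) with hpos
  set lo := PySem.List.bisectRight pos a with hlo
  set hi := PySem.List.bisectRight pos b with hhi
  have hlen : pos.length = X.length := List.length_map ..
  have hpw : pos.Pairwise (· ≤ ·) := by
    rw [hpos]; exact List.pairwise_map.2 (PySem.List.sorted_pairwise T (fun t => t.1))
  obtain ⟨hAle, hAlt, hAgt⟩ := PySem.List.bisectRight_spec pos a hpw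
  obtain ⟨hBle, hBlt, hBgt⟩ := PySem.List.bisectRight_spec pos b hpw
  have hgetpos : ∀ (j : Nat) (hj : j < X.length), pos[j]'(by omega) = X[j].1 := by
    intro j hj; simp [hpos]
  have hlohi : lo ≤ hi := by
    by_contra hc
    push Not at hc
    have hhilen : hi < pos.length := lt_of_lt_of_le hc hAle
    have h1 := hAlt hi hhilen hc
    have h2 := hBgt hi hhilen (le_refl _)
    omega
  have hdrop : X.drop lo = X.filter (fun t => decide (a < t.1)) := by
    apply pv_drop_eq_filter
    · intro j hj hjlo
      have := hAlt j (by omega) hjlo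
      rw [hgetpos j hj] at this
      simp [this, not_lt]
    · intro j hj hjlo
      have := hAgt j (by omega) hjlo
      rw [hgetpos j hj] at this
      simp [this]
  have htake : (X.drop lo).take (hi - lo) = (X.drop lo).filter (fun t => decide (t.1 ≤ b)) := by
    apply pv_take_eq_filter
    · intro j hj hjk
      have hlj : lo + j < X.length := by simp [List.length_drop] at hj; omega
      rw [List.getElem_drop]
      have := hBlt (lo + j) (by omega) (by omega)
      rw [hgetpos (lo + j) hlj] at this
      simp [this]
    · intro j hj hjk
      have hlj : lo + j < X.length := by simp [List.length_drop] at hj; omega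
      rw [List.getElem_drop]
      have := hBgt (lo + j) (by omega) (by omega)
      rw [hgetpos (lo + j) hlj] at this
      simp [not_le]
      omega
  have hslice : PySem.List.slice X (some (lo : Int)) (some (hi : Int))
      = X.filter (fun t => decide (a < t.1 ∧ t.1 ≤ b)) := by
    rw [PySem.List.slice_natCast, htake, hdrop, List.filter_filter]
    congr 1
    funext t
    simp [Bool.and_comm]
  rw [hslice]
  apply PySem.List.sorted_eq_of_perm_of_pairwise_lt
  · exact ((PySem.List.sorted_perm T (fun t => t.1) false).filter _).symm
  · refine List.Pairwise.filter _ ?_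
    rw [hT]
    exact (PySem.List.pairwise_lt_enumerate R 0).map _ (fun p q h => by simpa using h)

theorem pv_emit (R : List (Int × (List (String × Int)))) (s a b l1 : Int) (l2 : List (String × Int)) :
    (((PySem.List.enumerate R s).map (fun p => (p.2.1, p.1, p.2.2))).filter
        (fun t => decide (a < t.1 ∧ t.1 ≤ b))).map (fun t => (l1, t.1, l2, t.2.2))
    = (R.filter (fun r => decide (a < r.1 ∧ r.1 ≤ b))).map (fun r => (l1, r.1, l2, r.2)) := by
  induction R generalizing s with
  | nil => simp [PySem.List.enumerate_nil]
  | cons r t ih =>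
    simp only [PySem.List.enumerate_cons, List.map_cons, List.filter_cons]
    split_ifs with h1
    · simp only [List.map_cons, ih]
    · exact ih (s + 1)

theorem pv_B_eq (L R : List (Int × (List (String × Int)))) :
    evaluate_matches_alt L R = pvC L R := by
  unfold evaluate_matches_alt pvC
  simp only [PySem.List.foldl_append_singleton_eq_map, PySem.List.foldl_append_eq_flatMap,
    List.nil_append]
  congr 1
  funext l
  rw [pv_window R l.1 (l.1 + 2000) (by omega), pv_emit R 0 l.1 (l.1 + 2000) l.1 l.2]
  congr 1
  apply List.filter_congr
  intro r _
  apply decide_eq_decide.2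
  omega

-- ===== VERDICT (by name: the statement is the Claim_ definition above) =====
theorem evaluate_matches_spec : Claim_equal_evaluate_matches := by
  intro L R _
  unfold Spec_evaluate_matches
  rw [pv_A_eq, pv_B_eq]
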